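-- pv_equiv track=rewrite | github.com/JoseAugusto011/PLI | Metaheuristica/spolm.py | avaliar_solucao
-- ===== SOURCE A (Python) =====
-- def calcular_custo_time(solucao, distancias):
--     custo_total = 0
--     for time, rodadas in enumerate(solucao):
--         for rodada in range(len(rodadas)):
--             adversario = solucao[time][rodada]
--             if adversario > 0:  # Jogou em casa
--                 custo_total += distancias[time][adversario - 1]
--             else:  # Jogou fora de casa
--                 custo_total += distancias[abs(adversario) - 1][time]
--     return custo_total
--
-- def avaliar_solucao(solucao, distancias, penalidade):
--     custo_total = calcular_custo_time(solucao, distancias)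
--
--     # Penaliza soluções que violam restrições (exemplo: jogos consecutivos em casa/fora)
--     violacoes = 0
--     for time in range(len(solucao)):
--         consecutivos = 0
--         for rodada in range(1, len(solucao[time])):
--             if (solucao[time][rodada] > 0 and solucao[time][rodada-1] > 0) or (solucao[time][rodada] < 0 and solucao[time][rodada-1] < 0):
--                 consecutivos += 1
--             else:
--                 consecutivos = 0
--             if consecutivos >= 2:
--                 violacoes += 1
--
--     return custo_total + (penalidade * violacoes)
-- ===== SOURCE B (Python) =====
-- def avaliar_solucao(solucao, distancias, penalidade):
--     custo = sum(
--         distancias[t][a - 1] if a > 0 else distancias[-a - 1][t]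
--         for t, rodadas in enumerate(solucao)
--         for a in rodadas
--     )
--     # a violation happens exactly at every window of 3 consecutive rounds with the
--     # same nonzero sign, so count sliding triples instead of running a counter
--     violacoes = sum(
--         1
--         for rodadas in solucao
--         for x, y, z in zip(rodadas, rodadas[1:], rodadas[2:])
--         if (x > 0 and y > 0 and z > 0) or (x < 0 and y < 0 and z < 0)
--     )
--     return custo + penalidade * violacoes
-- ===== Notes on version B (the rewrite author's own statement) =====
-- stated objective: alternative
-- what changed: The stateful reset-counter violation loop is replaced by a stateless sliding-window count: a violation occurs exactly at each window of three consecutive rounds with the same nonzero sign, so B counts triples over zip(row, row[1:], row[2:]) with no accumulator or carried streak state; the travel cost becomes one flat generator sum.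
import Mathlib
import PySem

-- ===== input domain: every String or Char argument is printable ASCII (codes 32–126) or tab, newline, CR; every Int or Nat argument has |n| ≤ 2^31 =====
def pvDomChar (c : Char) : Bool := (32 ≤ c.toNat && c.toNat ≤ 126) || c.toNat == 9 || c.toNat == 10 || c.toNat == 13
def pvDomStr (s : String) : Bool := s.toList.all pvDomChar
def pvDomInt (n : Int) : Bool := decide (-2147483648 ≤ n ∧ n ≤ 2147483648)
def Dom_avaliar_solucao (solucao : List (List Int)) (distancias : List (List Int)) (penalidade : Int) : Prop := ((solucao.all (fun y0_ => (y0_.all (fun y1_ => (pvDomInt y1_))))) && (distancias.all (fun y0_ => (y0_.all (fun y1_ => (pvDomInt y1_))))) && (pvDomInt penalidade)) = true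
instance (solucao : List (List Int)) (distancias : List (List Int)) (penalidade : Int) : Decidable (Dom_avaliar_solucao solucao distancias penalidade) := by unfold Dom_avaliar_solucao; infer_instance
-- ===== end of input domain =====

-- B replaces A's stateful reset-counter violation loop by a stateless sliding-window count of
-- same-nonzero-sign triples zip(row,row[1:],row[2:]), and sums the travel cost in one flat pass.


-- ===== PORT A =====
-- body of A's cost loop (a = adversario = solucao[time][rodada]); pyGetD is exact under Pre_
def pvCustoStep (distancias : List (List Int)) (time : Int) (c a : Int) : Int :=
  if a > 0 then
    c + PySem.List.pyGetD (PySem.List.pyGetD distancias time []) (a - 1) 0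
  else
    c + PySem.List.pyGetD (PySem.List.pyGetD distancias (|a| - 1) []) time 0

-- calcular_custo_time, transliterated
def pvCalcularCusto (solucao : List (List Int)) (distancias : List (List Int)) : Int :=
  (PySem.List.enumerate solucao).foldl (fun custo p =>
    (PySem.List.pyRange 0 (p.2.length : Int) 1).foldl (fun c rodada =>
      pvCustoStep distancias p.1 c
        (PySem.List.pyGetD (PySem.List.pyGetD solucao p.1 []) rodada 0)) custo) 0

-- one inner step of A's violation loop over rodada ∈ range(1, len(row)); st = (consecutivos, violacoes)
def pvStepA (row : List Int) (st : Int × Int) (rodada : Int) : Int × Int :=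
  let c : Int :=
    if (PySem.List.pyGetD row rodada 0 > 0 ∧ PySem.List.pyGetD row (rodada - 1) 0 > 0) ∨
       (PySem.List.pyGetD row rodada 0 < 0 ∧ PySem.List.pyGetD row (rodada - 1) 0 < 0)
    then st.1 + 1 else 0
  (c, if c ≥ 2 then st.2 + 1 else st.2)

def avaliar_solucao (solucao : List (List Int)) (distancias : List (List Int)) (penalidade : Int) : Int :=
  let custo_total := pvCalcularCusto solucao distancias
  let violacoes :=
    (PySem.List.pyRange 0 (solucao.length : Int) 1).foldl (fun v time =>
      ((PySem.List.pyRange 1 ((PySem.List.pyGetD solucao time []).length : Int) 1).foldl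
        (pvStepA (PySem.List.pyGetD solucao time [])) (0, v)).2) 0
  custo_total + penalidade * violacoes

-- ===== PORT B =====
-- the triple filter of B's violation comprehension
def pvTripOK (x y z : Int) : Bool :=
  decide ((x > 0 ∧ y > 0 ∧ z > 0) ∨ (x < 0 ∧ y < 0 ∧ z < 0))

def avaliar_solucao_alt (solucao : List (List Int)) (distancias : List (List Int)) (penalidade : Int) : Int :=
  let custo :=
    (PySem.List.enumerate solucao).foldl (fun acc p =>
      p.2.foldl (fun acc2 a =>
        acc2 + (if a > 0 then
                  PySem.List.pyGetD (PySem.List.pyGetD distancias p.1 []) (a - 1) 0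
                else
                  PySem.List.pyGetD (PySem.List.pyGetD distancias (-a - 1) []) p.1 0)) acc) 0
  let violacoes : Int :=
    solucao.foldl (fun v rodadas =>
      v + ((rodadas.zip ((PySem.List.slice rodadas (some 1) none).zip
                         (PySem.List.slice rodadas (some 2) none))).countP
            (fun t => pvTripOK t.1 t.2.1 t.2.2) : Int)) 0
  custo + penalidade * violacoes

-- ===== PRECONDITION & SPEC =====
-- Pre_: every distance lookup the cost loop performs is in range (otherwise Python raises IndexError).
def pvCellOK (distancias : List (List Int)) (time a : Int) : Bool :=
  if a > 0 then
    match PySem.List.pyGet? distancias time with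
    | some row => (PySem.List.pyGet? row (a - 1)).isSome
    | none => false
  else
    match PySem.List.pyGet? distancias (|a| - 1) with
    | some row => (PySem.List.pyGet? row time).isSome
    | none => false

def Pre_avaliar_solucao (solucao : List (List Int)) (distancias : List (List Int)) (penalidade : Int) : Prop :=
  ((PySem.List.enumerate solucao).all (fun p => p.2.all (fun a => pvCellOK distancias p.1 a))) = true

instance (solucao : List (List Int)) (distancias : List (List Int)) (penalidade : Int) : Decidable (Pre_avaliar_solucao solucao distancias penalidade) := by unfold Pre_avaliar_solucao; infer_instance

def pvWitness_avaliar_solucao : List (List Int) × List (List Int) × Int :=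
  ([[2, -2], [-1, 1]], [[0, 3], [4, 0]], 10)

def Spec_avaliar_solucao (solucao : List (List Int)) (distancias : List (List Int)) (penalidade : Int) (out : Int) : Prop := out = avaliar_solucao_alt solucao distancias penalidade
instance (solucao : List (List Int)) (distancias : List (List Int)) (penalidade : Int) (out : Int) : Decidable (Spec_avaliar_solucao solucao distancias penalidade out) := by unfold Spec_avaliar_solucao; infer_instance

-- ===== CLAIM (what is proved, stated in full; the proofs are below) =====
def Claim_equal_avaliar_solucao : Prop := ∀ (solucao : List (List Int)) (distancias : List (List Int)) (penalidade : Int), Dom_avaliar_solucao solucao distancias penalidade → Pre_avaliar_solucao solucao distancias penalidade → Spec_avaliar_solucao solucao distancias penalidade (avaliar_solucao solucao distancias penalidade)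

-- ===== LEMMAS AND PROOFS =====

-- A's inner violation loop, written as structural recursion with the previous element carried.
def pvLoopA (prev : Int) : List Int → Int × Int → Int × Int
  | [], st => st
  | y :: ys, st =>
    let c : Int := if (y > 0 ∧ prev > 0) ∨ (y < 0 ∧ prev < 0) then st.1 + 1 else 0
    pvLoopA y ys (c, if c ≥ 2 then st.2 + 1 else st.2)

-- same-sign pair test
def pvSame (p y : Int) : Bool := decide ((y > 0 ∧ p > 0) ∨ (y < 0 ∧ p < 0))

-- violation count with carried previous element p and flag b = "pair before p was same-sign"
def pvW (b : Bool) (p : Int) : List Int → Int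
  | [] => 0
  | y :: ys => if pvSame p y then (if b then 1 else 0) + pvW true y ys else pvW false y ys

-- B's per-row triple count (on drops; the port's slices reduce to these)
def pvCntRow (row : List Int) : Int :=
  ((row.zip ((row.drop 1).zip (row.drop 2))).countP (fun t => pvTripOK t.1 t.2.1 t.2.2) : Int)

-- A's index fold over range(k+1, len(row)) equals pvLoopA on row[k] and the tail after k.
theorem pvBridgeA (row : List Int) : ∀ (m k : Nat) (st : Int × Int),
    (hk : k < row.length) → row.length - (k + 1) = m →
    (PySem.List.pyRange ((k : Int) + 1) (row.length : Int) 1).foldl (pvStepA row) st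
      = pvLoopA row[k] (row.drop (k + 1)) st := by
  intro m
  induction m with
  | zero =>
    intro k st hk hm
    have hb : (row.length : Int) ≤ (k : Int) + 1 := by omega
    rw [PySem.List.pyRange_one_eq_nil hb]
    have : row.drop (k + 1) = [] := List.drop_eq_nil_iff.mpr (by omega)
    simp [this, pvLoopA]
  | succ m ih =>
    intro k st hk hm
    have hk1 : k + 1 < row.length := by omega
    have ha : ((k : Int) + 1) < (row.length : Int) := by exact_mod_cast hk1
    rw [PySem.List.pyRange_one_cons ha]
    have hdrop : row.drop (k + 1) = row[k + 1] :: row.drop (k + 2) :=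
      List.drop_eq_getElem_cons hk1
    rw [List.foldl_cons, hdrop]
    have hget1 : PySem.List.pyGetD row ((k : Int) + 1) 0 = row[k + 1] := by
      have h : ((k : Int) + 1) = ((k + 1 : Nat) : Int) := by push_cast; ring
      rw [h, PySem.List.pyGetD_natCast]
      exact List.getD_eq_getElem row 0 hk1
    have hget0 : PySem.List.pyGetD row ((k : Int) + 1 - 1) 0 = row[k] := by
      have h : ((k : Int) + 1 - 1) = ((k : Nat) : Int) := by ring
      rw [h, PySem.List.pyGetD_natCast]
      exact List.getD_eq_getElem row 0 hk
    have hih := ih (k + 1) (pvStepA row st ((k : Int) + 1)) hk1 (by omega)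
    rw [show ((k + 1 : Nat) : Int) + 1 = (k : Int) + 1 + 1 by push_cast; ring] at hih
    rw [hih]
    simp only [pvStepA, pvLoopA, hget0, hget1]

-- A's structural loop counts via the flag abstraction pvW
theorem pvLoopA_eq_W : ∀ (xs : List Int) (p c v : Int), 0 ≤ c →
    (pvLoopA p xs (c, v)).2 = v + pvW (decide (1 ≤ c)) p xs := by
  intro xs
  induction xs with
  | nil => intro p c v hc; simp [pvLoopA, pvW]
  | cons y ys ih =>
    intro p c v hc
    by_cases h : (y > 0 ∧ p > 0) ∨ (y < 0 ∧ p < 0)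
    · have hs : pvSame p y = true := by simp [pvSame, h]
      simp only [pvLoopA, if_pos h]
      rw [ih y (c + 1) _ (by omega)]
      rw [show decide (1 ≤ c + 1) = true by simp; omega]
      simp only [pvW, hs]
      split_ifs with h2 h1 h1 <;> simp_all <;> omega
    · have hs : pvSame p y = false := by simp only [pvSame, decide_eq_false_iff_not]; exact h
      simp only [pvLoopA, if_neg h]
      rw [show (if (0:Int) ≥ 2 then v + 1 else v) = v by norm_num]
      rw [ih y 0 v (by omega)]
      rw [show decide ((1:Int) ≤ 0) = false by decide]
      simp [pvW, hs]

-- a triple is same-sign iff both of its adjacent pairs are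
theorem pvTrip_eq (p y z : Int) : pvTripOK p y z = (pvSame p y && pvSame y z) := by
  simp only [pvTripOK, pvSame, ← Bool.decide_and, decide_eq_decide]
  omega

-- the flag abstraction counts exactly B's same-sign triples
theorem pvW_eq_cnt : ∀ (ys : List Int) (p y : Int),
    pvW (pvSame p y) y ys = pvCntRow (p :: y :: ys) := by
  intro ys
  induction ys with
  | nil => intro p y; simp [pvW, pvCntRow]
  | cons z zs ih =>
    intro p y
    have e1 : pvCntRow (p :: y :: z :: zs)
        = (if pvTripOK p y z then 1 else 0) + pvCntRow (y :: z :: zs) := by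
      simp only [pvCntRow, List.drop_succ_cons, List.drop_zero,
        List.zip_cons_cons, List.countP_cons]
      split_ifs <;> push_cast <;> ring
    have e2 : pvW (pvSame p y) y (z :: zs)
        = (if pvTripOK p y z then 1 else 0) + pvW (pvSame y z) z zs := by
      rw [pvTrip_eq]
      cases hyz : pvSame y z <;> cases hpy : pvSame p y <;> simp [pvW, hyz]
    rw [e2, ih y z, e1]

-- per-row equality: A's violation loop adds exactly B's triple count
theorem pvRowEq (row : List Int) (v : Int) :
    ((PySem.List.pyRange 1 (row.length : Int) 1).foldl (pvStepA row) (0, v)).2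
      = v + pvCntRow row := by
  cases row with
  | nil => simp [PySem.List.pyRange_one_eq_nil, pvCntRow]
  | cons x xs =>
    have hb := pvBridgeA (x :: xs) ((x :: xs).length - 1) 0 (0, v) (by simp) (by simp)
    simp only [Nat.cast_zero, zero_add, List.getElem_cons_zero, List.drop_one, List.tail_cons] at hb
    rw [hb, pvLoopA_eq_W xs x 0 v (by omega)]
    rw [show decide ((1:Int) ≤ 0) = false by decide]
    cases xs with
    | nil => simp [pvW, pvCntRow]
    | cons y ys =>
      have hflag : pvW false x (y :: ys) = pvW (pvSame x y) y ys := by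
        cases h : pvSame x y <;> simp [pvW, h]
      rw [hflag, pvW_eq_cnt]

-- the two cost passes agree
theorem pvCostEq (solucao distancias : List (List Int)) :
    pvCalcularCusto solucao distancias
      = (PySem.List.enumerate solucao).foldl (fun acc p =>
          p.2.foldl (fun acc2 a =>
            acc2 + (if a > 0 then
                      PySem.List.pyGetD (PySem.List.pyGetD distancias p.1 []) (a - 1) 0
                    else
                      PySem.List.pyGetD (PySem.List.pyGetD distancias (-a - 1) []) p.1 0)) acc) 0 := by
  unfold pvCalcularCusto
  apply PySem.List.foldl_congr_mem
  intro acc p hp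
  obtain ⟨k, hk, hpk⟩ := (PySem.List.mem_enumerate_iff solucao 0 p).mp hp
  subst hpk
  simp only [zero_add]
  have hrow : PySem.List.pyGetD solucao ((k : Nat) : Int) [] = solucao[k] := by
    rw [PySem.List.pyGetD_natCast]; exact List.getD_eq_getElem solucao [] hk
  simp only [hrow]
  rw [PySem.List.foldl_pyRange_zero_pyGetD' solucao[k] 0 (pvCustoStep distancias (k : Int)) acc]
  apply PySem.List.foldl_congr_mem
  intro c a _
  simp only [pvCustoStep]
  split_ifs with h
  · rfl
  · rw [abs_of_nonpos (by omega)]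

-- the port's slices are the drops pvCntRow uses
theorem pvSliceCnt (row : List Int) :
    ((row.zip ((PySem.List.slice row (some 1) none).zip
               (PySem.List.slice row (some 2) none))).countP
        (fun t => pvTripOK t.1 t.2.1 t.2.2) : Int) = pvCntRow row := by
  have h1 : PySem.List.slice row (some 1) none = row.drop 1 := by
    simpa using PySem.List.slice_from_natCast row 1
  have h2 : PySem.List.slice row (some 2) none = row.drop 2 := by
    simpa using PySem.List.slice_from_natCast row 2
  rw [h1, h2, pvCntRow]

-- ===== VERDICT (by name: the statement is the Claim_ definition above) =====
theorem avaliar_solucao_spec : Claim_equal_avaliar_solucao := by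
  intro solucao distancias penalidade _ _
  unfold Spec_avaliar_solucao avaliar_solucao avaliar_solucao_alt
  rw [pvCostEq]
  have hv : (PySem.List.pyRange 0 (solucao.length : Int) 1).foldl (fun v time =>
      ((PySem.List.pyRange 1 ((PySem.List.pyGetD solucao time []).length : Int) 1).foldl
        (pvStepA (PySem.List.pyGetD solucao time [])) (0, v)).2) 0
      = solucao.foldl (fun v rodadas =>
          v + ((rodadas.zip ((PySem.List.slice rodadas (some 1) none).zip
                             (PySem.List.slice rodadas (some 2) none))).countP
                (fun t => pvTripOK t.1 t.2.1 t.2.2) : Int)) 0 := by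
    rw [PySem.List.foldl_pyRange_zero_pyGetD' solucao []
        (fun v row => ((PySem.List.pyRange 1 (row.length : Int) 1).foldl (pvStepA row) (0, v)).2) 0]
    apply PySem.List.foldl_congr_mem
    intro v row _
    rw [pvRowEq, pvSliceCnt]
  rw [hv]
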